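-- pv_equiv track=rewrite | github.com/Metta-AI/metta | metta/map/utils/ascii_grid.py | char_grid_to_lines
-- ===== SOURCE A (Python) =====
-- def char_grid_to_lines(text: str) -> tuple[list[str], int, int]:
--     lines = []
--     for line in text.strip().split("\n"):
--         line = line.strip()
--         lines.append(line)
--     height = len(lines)
--     width = max(len(line) for line in lines)
--     if not all(len(line) == width for line in lines):
--         raise ValueError("All lines must be the same width")
--     return (lines, width, height)
-- ===== SOURCE B (Python) =====
-- def char_grid_to_lines(text: str) -> tuple[list[str], int, int]:
--     it = iter(text.strip().split("\n"))
--     first = next(it).strip()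
--     width = len(first)
--     lines = [first]
--     for raw in it:
--         line = raw.strip()
--         if len(line) != width:
--             raise ValueError("All lines must be the same width")
--         lines.append(line)
--     return (lines, width, len(lines))
-- ===== Notes on version B (the rewrite author's own statement) =====
-- stated objective: alternative
-- what changed: A builds all lines, then computes the max width in a second pass and re-checks every line with all() in a third; B streams once: the first stripped line fixes the width and each subsequent line is stripped and validated against it as it is appended, so the max scan and the all() pass disappear.
import Mathlib
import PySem

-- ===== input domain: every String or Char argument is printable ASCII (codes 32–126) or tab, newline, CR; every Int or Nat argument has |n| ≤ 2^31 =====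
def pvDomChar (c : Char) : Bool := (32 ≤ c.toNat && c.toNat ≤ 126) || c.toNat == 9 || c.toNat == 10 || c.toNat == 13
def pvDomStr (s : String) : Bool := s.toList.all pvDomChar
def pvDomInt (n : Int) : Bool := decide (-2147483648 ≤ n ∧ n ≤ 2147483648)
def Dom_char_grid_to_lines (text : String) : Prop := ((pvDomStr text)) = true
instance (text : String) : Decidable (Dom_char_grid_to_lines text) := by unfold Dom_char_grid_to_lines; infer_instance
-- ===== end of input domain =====

-- B streams once: the first stripped line fixes the width and each later line is validated
-- against it as it is appended, so A's separate max scan and all() pass disappear (objective: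
-- alternative). Both programs raise ValueError on non-uniform widths; those inputs are outside Pre_.

-- ===== PORT A =====
def char_grid_to_lines (text : String) : List String × Int × Int :=
  let lines : List String :=
    (((PySem.Str.split? (PySem.Str.strip text) "\n").getD [])).foldl
      (fun acc line => acc ++ [PySem.Str.strip line]) []
  let height : Int := lines.length
  let width : Int := (PySem.List.max? (lines.map PySem.Str.len) (fun x => x)).getD 0
  if lines.all (fun line => PySem.Str.len line == width) then (lines, width, height)
  else ([], 0, 0)  -- Python raises ValueError here (outside Pre_)

-- ===== PORT B =====
-- the 'for raw in it' loop of Source B: append each stripped line, failing on a width mismatch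
def char_grid_to_lines_loop (width : Int) (acc : List String) : List String → Option (List String)
  | [] => some acc
  | raw :: rest =>
    let line := PySem.Str.strip raw
    if PySem.Str.len line == width then char_grid_to_lines_loop width (acc ++ [line]) rest
    else none  -- Python raises ValueError here (outside Pre_)

def char_grid_to_lines_alt (text : String) : List String × Int × Int :=
  match (PySem.Str.split? (PySem.Str.strip text) "\n").getD [] with
  | [] => ([], 0, 0)  -- unreachable: str.split always yields at least one piece
  | h :: t =>
    let first := PySem.Str.strip h
    let width : Int := PySem.Str.len first
    match char_grid_to_lines_loop width [first] t with
    | some lines => (lines, width, (lines.length : Int))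
    | none => ([], 0, 0)  -- Python raises ValueError here (outside Pre_)

-- ===== PRECONDITION & SPEC =====
-- Pre_ excludes exactly the inputs where the stripped lines do not all share one width:
-- there both A and B raise ValueError.
def Pre_char_grid_to_lines (text : String) : Prop :=
  ∀ l ∈ ((PySem.Str.split? (PySem.Str.strip text) "\n").getD []),
    PySem.Str.len (PySem.Str.strip l) =
      PySem.Str.len (PySem.Str.strip ((((PySem.Str.split? (PySem.Str.strip text) "\n").getD [])).headD ""))
instance (text : String) : Decidable (Pre_char_grid_to_lines text) := by
  unfold Pre_char_grid_to_lines; infer_instance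
def pvWitness_char_grid_to_lines : String := " ab \ncd\n"
def Spec_char_grid_to_lines (text : String) (out : List String × Int × Int) : Prop := out = char_grid_to_lines_alt text
instance (text : String) (out : List String × Int × Int) : Decidable (Spec_char_grid_to_lines text out) := by unfold Spec_char_grid_to_lines; infer_instance

-- ===== CLAIM (what is proved, stated in full; the proofs are below) =====
def Claim_equal_char_grid_to_lines : Prop := ∀ (text : String), Dom_char_grid_to_lines text → Pre_char_grid_to_lines text → Spec_char_grid_to_lines text (char_grid_to_lines text)

-- ===== LEMMAS AND PROOFS =====

theorem pv_foldl_append_eq_map {α β : Type} (f : α → β) :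
    ∀ (l : List α) (acc : List β),
      l.foldl (fun a x => a ++ [f x]) acc = acc ++ l.map f := by
  intro l
  induction l with
  | nil => simp
  | cons h t ih => intro acc; simp [List.foldl, ih]

theorem pv_foldl_max_const (c : Int) :
    ∀ (l : List Int), (∀ x ∈ l, x = c) → l.foldl max c = c := by
  intro l
  induction l with
  | nil => simp
  | cons h t ih =>
    intro hall
    have hh : h = c := hall h (by simp)
    simp [List.foldl, hh, ih (fun x hx => hall x (by simp [hx]))]

theorem pv_loop_all_eq (c : Int) :
    ∀ (l : List String) (acc : List String),
      (∀ x ∈ l, PySem.Str.len (PySem.Str.strip x) = c) →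
      char_grid_to_lines_loop c acc l = some (acc ++ l.map PySem.Str.strip) := by
  intro l
  induction l with
  | nil => intro acc _; simp [char_grid_to_lines_loop]
  | cons h t ih =>
    intro acc hall
    have hh : PySem.Str.len (PySem.Str.strip h) = c := hall h (by simp)
    simp only [char_grid_to_lines_loop, hh, beq_self_eq_true, if_true]
    rw [ih _ (fun x hx => hall x (by simp [hx]))]
    simp

-- ===== VERDICT (by name: the statement is the Claim_ definition above) =====
theorem char_grid_to_lines_spec : Claim_equal_char_grid_to_lines := by
  intro text _ hpre
  unfold Spec_char_grid_to_lines char_grid_to_lines char_grid_to_lines_alt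
  simp only [pv_foldl_append_eq_map, List.nil_append]
  cases hsplit : ((PySem.Str.split? (PySem.Str.strip text) "\n").getD []) with
  | nil => simp [PySem.List.max?]
  | cons h t =>
    unfold Pre_char_grid_to_lines at hpre
    rw [hsplit] at hpre
    simp only [List.headD_cons] at hpre
    set c : Int := PySem.Str.len (PySem.Str.strip h) with hc
    have hallt : ∀ x ∈ t, PySem.Str.len (PySem.Str.strip x) = c := by
      intro x hx; exact hpre x (by simp [hx])
    have hall : ∀ x ∈ ((h :: t).map PySem.Str.strip).map PySem.Str.len, x = c := by
      intro x hx
      simp only [List.map_map, List.mem_map, Function.comp] at hx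
      obtain ⟨l, hl, rfl⟩ := hx
      rcases List.mem_cons.mp hl with rfl | hl'
      · rfl
      · exact hallt l hl'
    have hmax : PySem.List.max? (((h :: t).map PySem.Str.strip).map PySem.Str.len) (fun x => x)
        = some c := by
      simp only [List.map_cons]
      rw [PySem.List.max?_id_cons]
      refine congrArg some (pv_foldl_max_const c _ ?_)
      intro x hx
      exact hall x (by simp only [List.map_cons]; exact List.mem_cons_of_mem _ hx)
    have hloop : char_grid_to_lines_loop c [PySem.Str.strip h] t
        = some ([PySem.Str.strip h] ++ t.map PySem.Str.strip) :=
      pv_loop_all_eq c t _ hallt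
    rw [hmax]
    simp only [Option.getD_some]
    have hck : ((h :: t).map PySem.Str.strip).all (fun line => PySem.Str.len line == c) = true := by
      rw [List.all_eq_true]
      intro l hl
      simpa using hall (PySem.Str.len l) (List.mem_map_of_mem hl)
    rw [if_pos hck, hloop]
    simp [hc, PySem.Str.len]
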